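-- pv_equiv track=rewrite | github.com/marcelo-torres/green-scheduler | src/scheduling/util/count_active_tasks.py | _active_tasks_by_time
-- ===== SOURCE A (Python) =====
-- def _active_tasks_by_time(events):
--     active_tasks_count = 0
--
--     previous = (0, 0)
--     active_tasks_by_time = []
--     active_tasks = []
--
--     for event_time, event_type in events:
--         if event_type == 'start':
--             active_tasks_count += 1
--         else:
--             active_tasks_count -= 1
--
--         previous_time = previous[0]
--
--         if previous_time != event_time:
--             active_tasks_by_time.append(previous)
--             active_tasks.append(previous[1])
--         previous = (event_time, active_tasks_count)
--
--     active_tasks_by_time.append(previous)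
--     active_tasks.append(previous[1])
--
--     return active_tasks_by_time, active_tasks
-- ===== SOURCE B (Python) =====
-- def _active_tasks_by_time(events):
--     # Build the full running-count sequence, then keep each entry whose
--     # successor has a different time, plus the final entry.
--     seq = [(0, 0)]
--     c = 0
--     for t, ty in events:
--         c += 1 if ty == 'start' else -1
--         seq.append((t, c))
--     by_time = [p for p, q in zip(seq, seq[1:]) if q[0] != p[0]]
--     by_time.append(seq[-1])
--     return by_time, [p[1] for p in by_time]
-- ===== Notes on version B (the rewrite author's own statement) =====
-- stated objective: alternative
-- what changed: A's single fused loop that emits the previous pair whenever the event time changes is split into a build pass producing the full running-count sequence [(0,0)]+scan and a separate zip-lookahead filter that keeps each pair whose successor time differs plus the last pair.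
import Mathlib
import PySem

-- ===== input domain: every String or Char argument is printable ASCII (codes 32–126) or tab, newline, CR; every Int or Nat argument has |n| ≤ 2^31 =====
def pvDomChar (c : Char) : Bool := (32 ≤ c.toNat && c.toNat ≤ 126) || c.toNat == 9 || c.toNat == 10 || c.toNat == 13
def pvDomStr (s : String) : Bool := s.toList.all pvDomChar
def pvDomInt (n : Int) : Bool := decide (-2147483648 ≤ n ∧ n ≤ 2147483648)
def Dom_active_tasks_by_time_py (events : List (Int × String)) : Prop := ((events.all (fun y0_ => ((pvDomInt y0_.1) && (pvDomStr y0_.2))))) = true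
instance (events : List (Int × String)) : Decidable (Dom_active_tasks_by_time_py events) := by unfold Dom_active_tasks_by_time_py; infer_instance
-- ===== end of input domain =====

-- B replaces A's fused emit-on-change loop by a build pass (the full running-count
-- sequence) followed by a zip-lookahead filter; objective: alternative decomposition.

-- ===== PORT A =====
-- loop body of A; state = (active_tasks_count, previous, active_tasks_by_time, active_tasks)
def pvStepA (st : Int × (Int × Int) × List (Int × Int) × List Int) (ev : Int × String) :
    Int × (Int × Int) × List (Int × Int) × List Int :=
  let cnt := if ev.2 == "start" then st.1 + 1 else st.1 - 1
  let prev := st.2.1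
  if prev.1 != ev.1 then
    (cnt, (ev.1, cnt), st.2.2.1 ++ [prev], st.2.2.2 ++ [prev.2])
  else
    (cnt, (ev.1, cnt), st.2.2.1, st.2.2.2)

def active_tasks_by_time_py (events : List (Int × String)) : (List (Int × Int)) × List Int :=
  let st := events.foldl pvStepA (0, (0, 0), [], [])
  (st.2.2.1 ++ [st.2.1], st.2.2.2 ++ [st.2.1.2])

-- ===== PORT B =====
-- B's build pass: seq = [(0,0)] then (t, cumulative count) for each event
def pvStepB (st : List (Int × Int) × Int) (ev : Int × String) : List (Int × Int) × Int :=
  let c := if ev.2 == "start" then st.2 + 1 else st.2 - 1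
  (st.1 ++ [(ev.1, c)], c)

def active_tasks_by_time_py_alt (events : List (Int × String)) : (List (Int × Int)) × List Int :=
  let seq := (events.foldl pvStepB ([(0, 0)], 0)).1
  let by_time := ((seq.zip (PySem.List.slice seq (some 1) none)).filter
      (fun pq => pq.2.1 != pq.1.1)).map (·.1)
  let by_time := by_time ++ [(PySem.List.pyGet? seq (-1)).getD (0, 0)]  -- seq[-1]; seq is never empty
  (by_time, by_time.map (·.2))

-- ===== PRECONDITION & SPEC =====
def Spec_active_tasks_by_time_py (events : List (Int × String)) (out : (List (Int × Int)) × List Int) : Prop := out = active_tasks_by_time_py_alt events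
instance (events : List (Int × String)) (out : (List (Int × Int)) × List Int) : Decidable (Spec_active_tasks_by_time_py events out) := by unfold Spec_active_tasks_by_time_py; infer_instance

-- ===== CLAIM (what is proved, stated in full; the proofs are below) =====
def Claim_equal_active_tasks_by_time_py : Prop := ∀ (events : List (Int × String)), Dom_active_tasks_by_time_py events → Spec_active_tasks_by_time_py events (active_tasks_by_time_py events)

-- ===== LEMMAS AND PROOFS =====

-- reference recursion: the pair A's loop still produces from state (count c, previous prev)
def pvRef (c : Int) (prev : Int × Int) : List (Int × String) → (List (Int × Int)) × List Int
  | [] => ([prev], [prev.2])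
  | ev :: rest =>
    let c' := if ev.2 == "start" then c + 1 else c - 1
    let r := pvRef c' (ev.1, c') rest
    if prev.1 != ev.1 then (prev :: r.1, prev.2 :: r.2) else r

-- the cumulative-count tail of B's seq, from count c
def pvScan (c : Int) : List (Int × String) → List (Int × Int)
  | [] => []
  | ev :: rest =>
    let c' := if ev.2 == "start" then c + 1 else c - 1
    (ev.1, c') :: pvScan c' rest

lemma pvRef_snd (events : List (Int × String)) : ∀ (c : Int) (prev : Int × Int),
    (pvRef c prev events).2 = (pvRef c prev events).1.map (·.2) := by
  induction events with
  | nil => intro c prev; simp [pvRef]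
  | cons ev rest ih =>
    intro c prev
    simp only [pvRef]
    split <;> simp [ih]

lemma pvA_loop (events : List (Int × String)) :
    ∀ (c : Int) (prev : Int × Int) (abt : List (Int × Int)) (at_ : List Int),
    (let st := events.foldl pvStepA (c, prev, abt, at_)
     (st.2.2.1 ++ [st.2.1], st.2.2.2 ++ [st.2.1.2]))
    = (abt ++ (pvRef c prev events).1, at_ ++ (pvRef c prev events).2) := by
  induction events with
  | nil => intro c prev abt at_; simp [pvRef]
  | cons ev rest ih =>
    intro c prev abt at_
    simp only [List.foldl_cons, pvStepA, pvRef]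
    split <;> simp [ih]

lemma pvB_seq (events : List (Int × String)) :
    ∀ (acc : List (Int × Int)) (c : Int),
    (events.foldl pvStepB (acc, c)).1 = acc ++ pvScan c events := by
  induction events with
  | nil => intro acc c; simp [pvScan]
  | cons ev rest ih =>
    intro acc c
    simp only [List.foldl_cons, pvStepB, pvScan]
    simp [ih]

lemma pvB_filter (events : List (Int × String)) :
    ∀ (c : Int) (prev : Int × Int),
    (((prev :: pvScan c events).zip (prev :: pvScan c events).tail).filter
        (fun pq => pq.2.1 != pq.1.1)).map (·.1)
      ++ [(prev :: pvScan c events).getLast?.getD (0, 0)]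
    = (pvRef c prev events).1 := by
  induction events with
  | nil => intro c prev; simp [pvScan, pvRef]
  | cons ev rest ih =>
    intro c prev
    simp only [pvScan, pvRef, List.tail_cons, List.zip_cons_cons, List.filter_cons]
    by_cases h : prev.1 = ev.1
    · simp only [h, bne_self_eq_false, Bool.false_eq_true, if_false]
      have := ih (if ev.2 == "start" then c + 1 else c - 1) (ev.1, (if ev.2 == "start" then c + 1 else c - 1))
      simpa using this
    · have hb : (ev.1 != prev.1) = true := by simpa [bne] using Ne.symm h
      have hb' : (prev.1 != ev.1) = true := by simpa [bne] using h
      simp only [hb, hb', if_true, List.map_cons]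
      have := ih (if ev.2 == "start" then c + 1 else c - 1) (ev.1, (if ev.2 == "start" then c + 1 else c - 1))
      simp only [List.tail_cons] at this
      simpa using this

-- ===== VERDICT (by name: the statement is the Claim_ definition above) =====
theorem active_tasks_by_time_py_spec : Claim_equal_active_tasks_by_time_py := by
  intro events _
  unfold Spec_active_tasks_by_time_py
  unfold active_tasks_by_time_py active_tasks_by_time_py_alt
  rw [pvA_loop events 0 (0, 0) [] []]
  have hseq : (events.foldl pvStepB ([(0, 0)], 0)).1 = (0, 0) :: pvScan 0 events := by
    simpa using pvB_seq events [(0, 0)] 0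
  simp only [hseq, PySem.List.slice_from_one, PySem.List.pyGet?_neg_one,
    List.nil_append, pvB_filter events 0 (0, 0), pvRef_snd]
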